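-- pv_equiv track=rewrite | github.com/mcknuggie/transformer_melody_generator | midiPreprocessor.py | _clean_melody
-- ===== SOURCE A (Python) =====
-- def _clean_melody(note_list):
--     """
--     Removes () and , from melodies for easier processing
--
--     Parameters:
--         melody_str (str): A List of strs each representing a note
--
--     Returns:
--         list: a cleaned list of strs, each representing a clean note
--     """
--     cleaned_note_list = []
--
--     for note_str in note_list:
--         my_str = note_str.replace("(", "")
--         my_str = my_str.replace(")", "")
--         my_str = my_str.replace(",", "")
--         cleaned_note_list.append(my_str)
--
--     return cleaned_note_list
-- ===== SOURCE B (Python) =====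
-- def _clean_melody(note_list):
--     return ["".join(ch for ch in note_str if ch not in "(),")
--             for note_str in note_list]
-- ===== Notes on version B (the rewrite author's own statement) =====
-- stated objective: simpler
-- what changed: Replaces the accumulate-loop with three chained single-character replace() scans per note by a single list comprehension that builds each cleaned note in one character-filtering pass.
import Mathlib
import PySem

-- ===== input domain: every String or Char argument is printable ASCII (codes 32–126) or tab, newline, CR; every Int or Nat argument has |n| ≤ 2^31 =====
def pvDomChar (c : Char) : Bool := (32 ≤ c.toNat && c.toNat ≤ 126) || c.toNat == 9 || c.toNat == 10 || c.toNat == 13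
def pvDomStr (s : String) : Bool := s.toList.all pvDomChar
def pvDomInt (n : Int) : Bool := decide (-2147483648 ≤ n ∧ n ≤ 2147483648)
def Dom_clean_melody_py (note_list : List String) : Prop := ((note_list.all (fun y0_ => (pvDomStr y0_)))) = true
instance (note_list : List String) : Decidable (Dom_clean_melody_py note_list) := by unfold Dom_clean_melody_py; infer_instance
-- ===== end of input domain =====

-- B replaces the three chained replace() scans per note with one character-filtering pass (objective: simpler).

-- ===== PORT A =====
-- for-loop with an accumulator list; each note goes through three single-character replaces
def clean_melody_py (note_list : List String) : List String :=
  note_list.foldl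
    (fun cleaned_note_list note_str =>
      cleaned_note_list ++
        [PySem.Str.replace (PySem.Str.replace (PySem.Str.replace note_str "(" "") ")" "") "," ""])
    []

-- ===== PORT B =====
-- list comprehension; each cleaned note built in one pass keeping chars not in "(),"
def clean_melody_py_alt (note_list : List String) : List String :=
  note_list.map (fun note_str =>
    String.ofList (note_str.toList.filter (fun ch => !(ch == '(' || ch == ')' || ch == ','))))

-- ===== PRECONDITION & SPEC =====
def Spec_clean_melody_py (note_list : List String) (out : List String) : Prop := out = clean_melody_py_alt note_list
instance (note_list : List String) (out : List String) : Decidable (Spec_clean_melody_py note_list out) := by unfold Spec_clean_melody_py; infer_instance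

-- ===== CLAIM (what is proved, stated in full; the proofs are below) =====
def Claim_equal_clean_melody_py : Prop := ∀ (note_list : List String), Dom_clean_melody_py note_list → Spec_clean_melody_py note_list (clean_melody_py note_list)

-- ===== LEMMAS AND PROOFS =====

theorem replace_go_single (ch : Char) :
    ∀ (l acc : List Char) (fuel : Nat), l.length ≤ fuel →
      PySem.Chars.replace.go [ch] [] fuel l acc =
        acc.reverse ++ l.filter (fun c => c ≠ ch) := by
  intro l
  induction l with
  | nil =>
      intro acc fuel _
      cases fuel <;> simp [PySem.Chars.replace.go]
  | cons c t ih =>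
      intro acc fuel hf
      cases fuel with
      | zero => simp at hf
      | succ f =>
          simp only [PySem.Chars.replace.go, List.isPrefixOf, List.length_cons] at *
          by_cases h : ch = c
          · subst h
            simp only [beq_self_eq_true, Bool.true_and, if_pos]
            simp only [List.length_nil, Nat.zero_add, List.drop_succ_cons, List.drop_zero, List.reverse_nil, List.nil_append]
            rw [ih acc f (by omega)]
            simp
          · have hb : (ch == c) = false := beq_eq_false_iff_ne.mpr h
            simp only [hb, Bool.false_and, if_neg, Bool.false_eq_true, not_false_iff]
            rw [ih (c :: acc) f (by omega)]
            simp [Ne.symm h]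

theorem replace_single (ch : Char) (l : List Char) :
    PySem.Chars.replace l [ch] [] = l.filter (fun c => c ≠ ch) := by
  rw [PySem.Chars.replace]
  simp only [List.isEmpty_cons, Bool.false_eq_true, if_neg, not_false_iff]
  simpa using replace_go_single ch l [] l.length le_rfl

theorem clean_one (s : String) :
    PySem.Str.replace (PySem.Str.replace (PySem.Str.replace s "(" "") ")" "") "," "" =
      String.ofList (s.toList.filter (fun ch => !(ch == '(' || ch == ')' || ch == ','))) := by
  have h : (PySem.Str.replace (PySem.Str.replace (PySem.Str.replace s "(" "") ")" "") "," "").toList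
      = s.toList.filter (fun ch => !(ch == '(' || ch == ')' || ch == ',')) := by
    simp only [PySem.Str.toList_replace]
    have hp : ("(" : String).toList = ['('] := rfl
    have hq : (")" : String).toList = [')'] := rfl
    have hc : ("," : String).toList = [','] := rfl
    have he : ("" : String).toList = [] := rfl
    rw [hp, hq, hc, he, replace_single, replace_single, replace_single,
        List.filter_filter, List.filter_filter]
    apply List.filter_congr
    intro c _
    by_cases h1 : c = '(' <;> by_cases h2 : c = ')' <;> by_cases h3 : c = ',' <;>
      simp [h1, h2, h3]
  rw [← h, String.ofList_toList]

theorem foldl_append_map {α β : Type} (f : α → β) :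
    ∀ (l : List α) (acc : List β),
      l.foldl (fun r x => r ++ [f x]) acc = acc ++ l.map f := by
  intro l
  induction l with
  | nil => simp
  | cons x t ih => intro acc; simp [ih]

-- ===== VERDICT (by name: the statement is the Claim_ definition above) =====
theorem clean_melody_py_spec : Claim_equal_clean_melody_py := by
  intro note_list _
  unfold Spec_clean_melody_py clean_melody_py clean_melody_py_alt
  rw [foldl_append_map]
  simp only [List.nil_append]
  apply List.map_congr_left
  intro s _
  exact clean_one s
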